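-- pv_equiv track=rewrite | github.com/Nikunj-Gupta/GACG | edges.py | generate_edges_with_reset_timesteps
-- ===== SOURCE A (Python) =====
-- def generate_edges_with_reset_timesteps(N, k, t):
--     """
--     Generate edges for fully connected subgraphs and inter-subgraph connections,
--     with timesteps resetting after every t subgraphs.
--
--     :param N: Total number of nodes
--     :param k: Number of nodes per subgraph
--     :param t: Reset interval for timesteps
--     :return: Tuple (sorted_edges, timestep_values)
--     """
--     edges = set()  # To store unique edges
--     timesteps = {}  # Dictionary to store edge timesteps
--
--     num_subgraphs = N // k  # Number of subgraphs
--
--     for s in range(num_subgraphs):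
--         start = s * k  # Start index for the subgraph
--         current_timestep = (s % t) + 1  # Reset after every t subgraphs
--
--         # Generate fully connected subgraph edges
--         subgraph = [(start + j, start + i + j + 1) for j in range(k - 1) for i in range(k - j - 1)]
--
--         # Assign timestep for the current subgraph edges
--         for edge in subgraph:
--             edges.add(edge)
--             timesteps[edge] = current_timestep
--
--         # Add inter-subgraph connections (previous subgraph to current)
--         if s > 0:
--             for i in range(k):  # Connect each node to its corresponding node in the previous subgraph
--                 prev_node = (s - 1) * k + i
--                 curr_node = start + i
--                 if prev_node < curr_node:  # Avoid duplicate edges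
--                     edges.add((prev_node, curr_node))
--                     timesteps[(prev_node, curr_node)] = current_timestep
--
--     sorted_edges = sorted(edges)  # Sort edges for consistency
--     timestep_values = [timesteps[edge] for edge in sorted_edges]  # Extract timesteps in sorted order
--
--     return sorted_edges, timestep_values
-- ===== SOURCE B (Python) =====
-- def generate_edges_with_reset_timesteps(N, k, t):
--     """Emit the edges directly in sorted order with a single pass over the nodes
--     (no set, no dict, no final sort); each edge's timestep comes from the closed
--     form (v // k) % t + 1, the reset timestep of the larger endpoint's subgraph."""
--     if k <= 0:
--         return [], []
--     m = N // k  # number of subgraphs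
--     edges = []
--     for u in range(m * k):
--         s = u // k  # subgraph of node u
--         edges.extend((u, v) for v in range(u + 1, (s + 1) * k))
--         if s + 1 < m:
--             edges.append((u, u + k))
--     return edges, [(v // k) % t + 1 for (_, v) in edges]
-- ===== Notes on version B (the rewrite author's own statement) =====
-- stated objective: simpler
-- what changed: B drops A's set, timestep dict and final sort entirely: it emits the edges directly in sorted order with one pass over the nodes (per node, its intra-subgraph edges then its link into the next subgraph) and computes every timestep afterwards by the closed form (v // k) % t + 1 on the larger endpoint.
import Mathlib
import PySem

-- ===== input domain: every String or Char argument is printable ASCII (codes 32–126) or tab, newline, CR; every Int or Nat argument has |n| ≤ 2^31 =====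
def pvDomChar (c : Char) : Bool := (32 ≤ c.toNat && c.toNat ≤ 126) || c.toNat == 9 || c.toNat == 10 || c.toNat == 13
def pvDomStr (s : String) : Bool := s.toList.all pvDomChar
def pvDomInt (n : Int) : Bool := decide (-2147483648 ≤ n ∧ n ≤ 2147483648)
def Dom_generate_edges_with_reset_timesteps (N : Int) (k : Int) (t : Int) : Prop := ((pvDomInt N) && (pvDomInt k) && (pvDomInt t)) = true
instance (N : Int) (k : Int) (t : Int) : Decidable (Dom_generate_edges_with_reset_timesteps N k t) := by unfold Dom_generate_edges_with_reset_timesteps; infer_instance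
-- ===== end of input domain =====

-- B replaces A's set/dict/sort machinery by a single pass that emits the edges already in
-- sorted order and computes each timestep by the closed form (v // k) % t + 1; objective: simpler.


-- ===== PORT A =====
-- one iteration of A's `for s in range(num_subgraphs)` loop over the state (edges, timesteps)
def pvAStep (k t : Int) (st : PySem.Set (Int × Int) × PySem.Dict (Int × Int) Int) (s : Int) :
    PySem.Set (Int × Int) × PySem.Dict (Int × Int) Int :=
  let start := s * k
  let current_timestep := PySem.Int.mod s t + 1
  let subgraph := (PySem.List.pyRange 0 (k - 1) 1).flatMap (fun j =>
    (PySem.List.pyRange 0 (k - j - 1) 1).map (fun i => (start + j, start + i + j + 1)))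
  let st := subgraph.foldl
    (fun st edge => (PySem.Set.add st.1 edge, st.2.insert edge current_timestep)) st
  if s > 0 then
    (PySem.List.pyRange 0 k 1).foldl (fun st i =>
      let prev_node := (s - 1) * k + i
      let curr_node := start + i
      if prev_node < curr_node then
        (PySem.Set.add st.1 (prev_node, curr_node), st.2.insert (prev_node, curr_node) current_timestep)
      else st) st
  else st

def generate_edges_with_reset_timesteps (N : Int) (k : Int) (t : Int) : (List (Int × Int)) × List Int :=
  let num_subgraphs := PySem.Int.floordiv N k
  let st := (PySem.List.pyRange 0 num_subgraphs 1).foldl (pvAStep k t)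
    (PySem.Set.empty, PySem.Dict.empty)
  -- sorted(edges): Python compares int pairs lexicographically, i.e. the Lex order on Int × Int
  let sorted_edges := PySem.List.sorted st.1 (fun e => toLex e)
  -- timesteps[edge]: every edge of the set was also inserted into the dict, so the default 0 is never taken
  (sorted_edges, sorted_edges.map (fun e => st.2.getD e 0))

-- ===== PORT B =====
-- one iteration of B's `for u in range(m * k)` loop over the accumulated edge list
def pvBStep (m k : Int) (acc : List (Int × Int)) (u : Int) : List (Int × Int) :=
  let s := PySem.Int.floordiv u k
  let acc := acc ++ (PySem.List.pyRange (u + 1) ((s + 1) * k) 1).map (fun v => (u, v))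
  if s + 1 < m then acc ++ [(u, u + k)] else acc

def generate_edges_with_reset_timesteps_alt (N : Int) (k : Int) (t : Int) : (List (Int × Int)) × List Int :=
  if k ≤ 0 then ([], []) else
  let m := PySem.Int.floordiv N k
  let edges := (PySem.List.pyRange 0 (m * k) 1).foldl (pvBStep m k) []
  (edges, edges.map (fun e => PySem.Int.mod (PySem.Int.floordiv e.2 k) t + 1))

-- ===== PRECONDITION & SPEC =====
-- Pre_ is exactly where Python A returns normally: k = 0 is a ZeroDivisionError at N // k,
-- and t = 0 with at least one subgraph is a ZeroDivisionError at s % t.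
def Pre_generate_edges_with_reset_timesteps (N : Int) (k : Int) (t : Int) : Prop :=
  k ≠ 0 ∧ (t ≠ 0 ∨ PySem.Int.floordiv N k ≤ 0)
instance (N : Int) (k : Int) (t : Int) : Decidable (Pre_generate_edges_with_reset_timesteps N k t) := by
  unfold Pre_generate_edges_with_reset_timesteps; infer_instance

def pvWitness_generate_edges_with_reset_timesteps : Int × Int × Int := (6, 2, 2)

def Spec_generate_edges_with_reset_timesteps (N : Int) (k : Int) (t : Int)
    (out : (List (Int × Int)) × List Int) : Prop :=
  out = generate_edges_with_reset_timesteps_alt N k t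
instance (N : Int) (k : Int) (t : Int) (out : (List (Int × Int)) × List Int) :
    Decidable (Spec_generate_edges_with_reset_timesteps N k t out) := by
  unfold Spec_generate_edges_with_reset_timesteps; infer_instance

-- ===== CLAIM =====
def Claim_equal_generate_edges_with_reset_timesteps : Prop :=
  ∀ (N : Int) (k : Int) (t : Int), Dom_generate_edges_with_reset_timesteps N k t →
    Pre_generate_edges_with_reset_timesteps N k t →
    Spec_generate_edges_with_reset_timesteps N k t (generate_edges_with_reset_timesteps N k t)

-- ===== LEMMAS AND PROOFS =====

-- the list of intra-subgraph edges A builds for the subgraph starting at `start`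
def pvG1 (k start : Int) : List (Int × Int) :=
  (PySem.List.pyRange 0 (k - 1) 1).flatMap (fun j =>
    (PySem.List.pyRange 0 (k - j - 1) 1).map (fun i => (start + j, start + i + j + 1)))

-- the list of inter-subgraph edges A adds at iteration s > 0
def pvG2 (k s : Int) : List (Int × Int) :=
  (PySem.List.pyRange 0 k 1).map (fun i => ((s - 1) * k + i, s * k + i))

-- adding a batch of edges with one common timestep to A's state
def pvAdd (ct : Int) (st : PySem.Set (Int × Int) × PySem.Dict (Int × Int) Int)
    (L : List (Int × Int)) : PySem.Set (Int × Int) × PySem.Dict (Int × Int) Int :=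
  (L.foldl (fun s e => PySem.Set.add s e) st.1, L.foldl (fun d e => d.insert e ct) st.2)

-- the edges present after the first n subgraph iterations of A
def pvQ (k n : Int) (e : Int × Int) : Prop :=
  (∃ s, 0 ≤ s ∧ s < n ∧ s * k ≤ e.1 ∧ e.1 < e.2 ∧ e.2 < s * k + k) ∨
  (∃ s, 0 < s ∧ s < n ∧ (s - 1) * k ≤ e.1 ∧ e.1 < (s - 1) * k + k ∧ e.2 = e.1 + k)

-- the per-node batch B emits
def pvBG (m k u : Int) : List (Int × Int) :=
  (PySem.List.pyRange (u + 1) (PySem.Int.floordiv u k * k + k) 1).map (fun v => (u, v)) ++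
  (if PySem.Int.floordiv u k + 1 < m then [(u, u + k)] else [])

lemma mem_pvG1 (k start : Int) (e : Int × Int) :
    e ∈ pvG1 k start ↔ start ≤ e.1 ∧ e.1 < e.2 ∧ e.2 < start + k := by
  obtain ⟨a, b⟩ := e
  simp only [pvG1, List.mem_flatMap, List.mem_map, PySem.List.mem_pyRange_one, Prod.mk.injEq]
  constructor
  · rintro ⟨j, hj, i, hi, rfl, rfl⟩; omega
  · rintro ⟨h1, h2, h3⟩
    exact ⟨a - start, by omega, ⟨b - a - 1, by omega, by omega, by omega⟩⟩

lemma mem_pvG2 (k s : Int) (e : Int × Int) :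
    e ∈ pvG2 k s ↔ (s - 1) * k ≤ e.1 ∧ e.1 < (s - 1) * k + k ∧ e.2 = e.1 + k := by
  obtain ⟨a, b⟩ := e
  have hsk : s * k = (s - 1) * k + k := by ring
  simp only [pvG2, List.mem_map, PySem.List.mem_pyRange_one, Prod.mk.injEq, hsk]
  constructor
  · rintro ⟨i, hi, rfl, rfl⟩; omega
  · rintro ⟨h1, h2, h3⟩; exact ⟨a - (s - 1) * k, by omega, by omega, by omega⟩

lemma pvAStep_zero (k t : Int) (st : PySem.Set (Int × Int) × PySem.Dict (Int × Int) Int) :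
    pvAStep k t st 0 = pvAdd (PySem.Int.mod 0 t + 1) st (pvG1 k 0) := by
  obtain ⟨E, T⟩ := st
  simp only [pvAStep, pvAdd, pvG1, if_neg (by omega : ¬ (0:Int) > 0), zero_mul]
  rw [PySem.List.foldl_prod_mk (f := fun (s : PySem.Set (Int × Int)) (e : Int × Int) => PySem.Set.add s e)
    (g := fun (d : PySem.Dict (Int × Int) Int) (e : Int × Int) => d.insert e (PySem.Int.mod 0 t + 1))]

lemma pvAStep_pos (k t s : Int) (hk : 0 < k) (hs : 0 < s)
    (st : PySem.Set (Int × Int) × PySem.Dict (Int × Int) Int) :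
    pvAStep k t st s =
      pvAdd (PySem.Int.mod s t + 1) (pvAdd (PySem.Int.mod s t + 1) st (pvG1 k (s * k))) (pvG2 k s) := by
  obtain ⟨E, T⟩ := st
  simp only [pvAStep, pvAdd, pvG1, pvG2, if_pos hs]
  rw [PySem.List.foldl_prod_mk (f := fun (st : PySem.Set (Int × Int)) (e : Int × Int) => PySem.Set.add st e)
    (g := fun (d : PySem.Dict (Int × Int) Int) (e : Int × Int) => d.insert e (PySem.Int.mod s t + 1))]
  have h1 := PySem.List.foldl_congr_mem (PySem.List.pyRange 0 k 1)
      (fun (st : PySem.Set (Int × Int) × PySem.Dict (Int × Int) Int) i =>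
        if (s - 1) * k + i < s * k + i then
          (PySem.Set.add st.1 ((s - 1) * k + i, s * k + i),
            st.2.insert ((s - 1) * k + i, s * k + i) (PySem.Int.mod s t + 1))
        else st)
      (fun (st : PySem.Set (Int × Int) × PySem.Dict (Int × Int) Int) i =>
        (PySem.Set.add st.1 ((s - 1) * k + i, s * k + i),
          st.2.insert ((s - 1) * k + i, s * k + i) (PySem.Int.mod s t + 1)))
      ((List.foldl (fun st e => PySem.Set.add st e) E
          ((PySem.List.pyRange 0 (k - 1) 1).flatMap (fun j =>
            (PySem.List.pyRange 0 (k - j - 1) 1).map (fun i => (s * k + j, s * k + i + j + 1)))),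
        List.foldl (fun d e => d.insert e (PySem.Int.mod s t + 1)) T
          ((PySem.List.pyRange 0 (k - 1) 1).flatMap (fun j =>
            (PySem.List.pyRange 0 (k - j - 1) 1).map (fun i => (s * k + j, s * k + i + j + 1))))))
      (by
        intro acc i _
        have hlt : (s - 1) * k + i < s * k + i := by nlinarith
        simp [hlt])
  rw [h1]
  rw [← List.foldl_map (f := fun i => ((s - 1) * k + i, s * k + i))
      (g := fun (st : PySem.Set (Int × Int) × PySem.Dict (Int × Int) Int) e =>
        (PySem.Set.add st.1 e, st.2.insert e (PySem.Int.mod s t + 1)))]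
  rw [PySem.List.foldl_prod_mk (f := fun (st : PySem.Set (Int × Int)) (e : Int × Int) => PySem.Set.add st e)
    (g := fun (d : PySem.Dict (Int × Int) Int) (e : Int × Int) => d.insert e (PySem.Int.mod s t + 1))]

lemma mem_pvAdd_fst (ct : Int) (st : PySem.Set (Int × Int) × PySem.Dict (Int × Int) Int)
    (L : List (Int × Int)) (x : Int × Int) :
    x ∈ (pvAdd ct st L).1 ↔ x ∈ st.1 ∨ x ∈ L := by
  simpa using PySem.Set.mem_foldl_add L (fun e => e) st.1 x

lemma nodup_pvAdd_fst (ct : Int) (st : PySem.Set (Int × Int) × PySem.Dict (Int × Int) Int)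
    (L : List (Int × Int)) (h : st.1.Nodup) : (pvAdd ct st L).1.Nodup := by
  simp only [pvAdd]
  induction L generalizing st with
  | nil => simpa using h
  | cons a L ih =>
    simpa using ih (st := (PySem.Set.add st.1 a, st.2)) (PySem.Set.nodup_add _ _ h)

lemma get?_pvAdd (ct : Int) (st : PySem.Set (Int × Int) × PySem.Dict (Int × Int) Int)
    (L : List (Int × Int)) (x : Int × Int) :
    (pvAdd ct st L).2.get? x = if x ∈ L then some ct else st.2.get? x := by
  simp only [pvAdd]
  induction L generalizing st with
  | nil => simp
  | cons a L ih =>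
    have := ih (st := (st.1, st.2.insert a ct))
    simp only [List.foldl_cons] at this ⊢
    rw [this]
    by_cases hL : x ∈ L
    · simp [hL, List.mem_cons]
    · by_cases hxa : x = a
      · simp [hxa]
      · simp [hL, hxa, PySem.Dict.get?_insert]

lemma pvQ_succ (k n : Int) (hn : 0 ≤ n) (e : Int × Int) :
    pvQ k (n + 1) e ↔ pvQ k n e ∨ (n * k ≤ e.1 ∧ e.1 < e.2 ∧ e.2 < n * k + k) ∨
      (0 < n ∧ ((n - 1) * k ≤ e.1 ∧ e.1 < (n - 1) * k + k ∧ e.2 = e.1 + k)) := by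
  unfold pvQ
  constructor
  · rintro (⟨s, h1, h2, h3⟩ | ⟨s, h1, h2, h3⟩)
    · rcases (by omega : s < n ∨ s = n) with hs | rfl
      · exact Or.inl (Or.inl ⟨s, h1, hs, h3⟩)
      · exact Or.inr (Or.inl h3)
    · rcases (by omega : s < n ∨ s = n) with hs | rfl
      · exact Or.inl (Or.inr ⟨s, h1, hs, h3⟩)
      · exact Or.inr (Or.inr ⟨h1, h3⟩)
  · rintro ((⟨s, h1, h2, h3⟩ | ⟨s, h1, h2, h3⟩) | h | ⟨h0, h⟩)
    · exact Or.inl ⟨s, h1, by omega, h3⟩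
    · exact Or.inr ⟨s, h1, by omega, h3⟩
    · exact Or.inl ⟨n, hn, by omega, h⟩
    · exact Or.inr ⟨n, h0, by omega, h⟩

lemma pvFdiv_of_intra (k n : Int) (hk : 0 < k) (b : Int)
    (h1 : n * k ≤ b) (h2 : b < n * k + k) : PySem.Int.floordiv b k = n := by
  rw [PySem.Int.floordiv_eq_iff_of_pos hk]
  have : (n + 1) * k = n * k + k := by ring
  omega

-- one step of A's loop preserves the invariant
lemma pvA_step_inv (k t : Int) (hk : 0 < k) (n : Int) (hn : 0 ≤ n)
    (st : PySem.Set (Int × Int) × PySem.Dict (Int × Int) Int)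
    (hmem : ∀ e, e ∈ st.1 ↔ pvQ k n e) (hnd : st.1.Nodup)
    (hget : ∀ e ∈ st.1, st.2.get? e = some (PySem.Int.mod (PySem.Int.floordiv e.2 k) t + 1)) :
    (∀ e, e ∈ (pvAStep k t st n).1 ↔ pvQ k (n + 1) e) ∧ (pvAStep k t st n).1.Nodup ∧
    (∀ e ∈ (pvAStep k t st n).1, (pvAStep k t st n).2.get? e =
      some (PySem.Int.mod (PySem.Int.floordiv e.2 k) t + 1)) := by
  have hG1div : ∀ e : Int × Int, e ∈ pvG1 k (n * k) →
      PySem.Int.floordiv e.2 k = n := by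
    intro e hG1; rw [mem_pvG1] at hG1
    exact pvFdiv_of_intra k n hk e.2 (by omega) (by omega)
  have hG2div : ∀ e : Int × Int, e ∈ pvG2 k n → PySem.Int.floordiv e.2 k = n := by
    intro e hG2; rw [mem_pvG2] at hG2
    have hr : n * k = (n - 1) * k + k := by ring
    exact pvFdiv_of_intra k n hk e.2 (by omega) (by omega)
  rcases eq_or_lt_of_le hn with rfl | hpos
  · -- n = 0
    rw [pvAStep_zero]
    have h0 : pvG1 k 0 = pvG1 k (0 * k) := by rw [zero_mul]
    refine ⟨?_, ?_, ?_⟩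
    · intro e
      rw [mem_pvAdd_fst, hmem e, pvQ_succ k 0 le_rfl e, h0, mem_pvG1]
      have : (0 : Int) * k = 0 := zero_mul k
      constructor
      · rintro (h | h)
        · exact Or.inl h
        · exact Or.inr (Or.inl (by omega))
      · rintro (h | h | h)
        · exact Or.inl h
        · exact Or.inr (by omega)
        · omega
    · exact nodup_pvAdd_fst _ _ _ hnd
    · intro e he
      rw [get?_pvAdd]
      by_cases hG : e ∈ pvG1 k 0
      · rw [if_pos hG, hG1div e (h0 ▸ hG)]
      · rw [if_neg hG]
        rw [mem_pvAdd_fst] at he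
        rcases he with he | he
        · exact hget e he
        · exact absurd he hG
  · -- 0 < n
    rw [pvAStep_pos k t n hk hpos]
    refine ⟨?_, ?_, ?_⟩
    · intro e
      rw [mem_pvAdd_fst, mem_pvAdd_fst, hmem e, pvQ_succ k n hn e, mem_pvG1, mem_pvG2]
      constructor
      · rintro ((h | h) | h)
        · exact Or.inl h
        · exact Or.inr (Or.inl h)
        · exact Or.inr (Or.inr ⟨hpos, h⟩)
      · rintro (h | h | ⟨_, h⟩)
        · exact Or.inl (Or.inl h)
        · exact Or.inl (Or.inr h)
        · exact Or.inr h
    · exact nodup_pvAdd_fst _ _ _ (nodup_pvAdd_fst _ _ _ hnd)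
    · intro e he
      rw [get?_pvAdd]
      by_cases hG2 : e ∈ pvG2 k n
      · rw [if_pos hG2, hG2div e hG2]
      · rw [if_neg hG2, get?_pvAdd]
        by_cases hG1 : e ∈ pvG1 k (n * k)
        · rw [if_pos hG1, hG1div e hG1]
        · rw [if_neg hG1]
          rw [mem_pvAdd_fst, mem_pvAdd_fst] at he
          rcases he with (he | he) | he
          · exact hget e he
          · exact absurd he hG1
          · exact absurd he hG2

-- the invariant of A's main loop
lemma pvA_loop (k t : Int) (hk : 0 < k) (n : Nat) :
    (∀ e, e ∈ ((PySem.List.pyRange 0 (n : Int) 1).foldl (pvAStep k t)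
        (PySem.Set.empty, PySem.Dict.empty)).1 ↔ pvQ k (n : Int) e) ∧
    ((PySem.List.pyRange 0 (n : Int) 1).foldl (pvAStep k t)
        (PySem.Set.empty, PySem.Dict.empty)).1.Nodup ∧
    (∀ e, e ∈ ((PySem.List.pyRange 0 (n : Int) 1).foldl (pvAStep k t)
        (PySem.Set.empty, PySem.Dict.empty)).1 →
      ((PySem.List.pyRange 0 (n : Int) 1).foldl (pvAStep k t)
        (PySem.Set.empty, PySem.Dict.empty)).2.get? e =
        some (PySem.Int.mod (PySem.Int.floordiv e.2 k) t + 1)) := by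
  induction n with
  | zero =>
    rw [show ((0 : Nat) : Int) = 0 by norm_num, PySem.List.pyRange_one_eq_nil le_rfl]
    refine ⟨?_, ?_, ?_⟩
    · intro e
      simp only [List.foldl_nil]
      constructor
      · intro h; exact absurd h (by simp [PySem.Set.empty])
      · rintro (⟨s, h1, h2, _⟩ | ⟨s, h1, h2, _⟩) <;> omega
    · simp [PySem.Set.empty]
    · intro e he; exact absurd he (by simp [PySem.Set.empty])
  | succ n ih =>
    obtain ⟨ihm, ihnd, ihg⟩ := ih
    have hcast : ((n + 1 : Nat) : Int) = (n : Int) + 1 := by push_cast; ring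
    rw [hcast, PySem.List.pyRange_one_succ_right (by positivity), List.foldl_append,
      List.foldl_cons, List.foldl_nil]
    exact pvA_step_inv k t hk n (by positivity) _ ihm ihnd ihg

lemma pvBStep_eq (m k : Int) (acc : List (Int × Int)) (u : Int) :
    pvBStep m k acc u = acc ++ pvBG m k u := by
  have h : (PySem.Int.floordiv u k + 1) * k = PySem.Int.floordiv u k * k + k := by ring
  simp only [pvBStep, pvBG, h]
  split <;> simp

lemma pvB_edges (m k : Int) :
    (PySem.List.pyRange 0 (m * k) 1).foldl (pvBStep m k) [] =
      (PySem.List.pyRange 0 (m * k) 1).flatMap (pvBG m k) := by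
  have h : ∀ acc, ∀ u ∈ PySem.List.pyRange 0 (m * k) 1,
      pvBStep m k acc u = acc ++ pvBG m k u := fun acc u _ => pvBStep_eq m k acc u
  rw [PySem.List.foldl_congr_mem _ _ _ _ h, PySem.List.foldl_append_eq_flatMap]
  simp

lemma fst_of_mem_pvBG (m k u : Int) (e : Int × Int) (h : e ∈ pvBG m k u) : e.1 = u := by
  simp only [pvBG, List.mem_append, List.mem_map] at h
  rcases h with ⟨v, _, rfl⟩ | h
  · rfl
  · split at h <;> simp at h
    · simp [h]

lemma mem_pvB (m k : Int) (hk : 0 < k) (e : Int × Int) :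
    e ∈ (PySem.List.pyRange 0 (m * k) 1).flatMap (pvBG m k) ↔ pvQ k m e := by
  obtain ⟨a, b⟩ := e
  simp only [List.mem_flatMap, PySem.List.mem_pyRange_one, pvBG, List.mem_append, List.mem_map,
    Prod.mk.injEq]
  constructor
  · rintro ⟨u, ⟨hu0, hum⟩, h⟩
    have hbr := (PySem.Int.floordiv_eq_iff_of_pos hk (a := u) (q := PySem.Int.floordiv u k)).1 rfl
    have hs0 : 0 ≤ PySem.Int.floordiv u k := (PySem.Int.le_floordiv_iff_mul_le hk).2 (by omega)
    have hsm : PySem.Int.floordiv u k < m := (PySem.Int.floordiv_lt_iff_lt_mul hk).2 hum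
    have hr : (PySem.Int.floordiv u k + 1) * k = PySem.Int.floordiv u k * k + k := by ring
    rcases h with ⟨v, hv, rfl, rfl⟩ | h
    · exact Or.inl ⟨PySem.Int.floordiv u k, hs0, hsm, by omega, by omega, by omega⟩
    · split at h
      · simp only [List.mem_singleton, Prod.mk.injEq] at h
        obtain ⟨rfl, rfl⟩ := h
        refine Or.inr ⟨PySem.Int.floordiv a k + 1, by omega, by omega, by simpa using hbr.1, ?_, rfl⟩
        have : (PySem.Int.floordiv a k + 1 - 1) * k = PySem.Int.floordiv a k * k := by ring
        omega
      · simp at h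
  · rintro (⟨s, h1, h2, h3, h4, h5⟩ | ⟨s, h1, h2, h3, h4, h5⟩)
    · refine ⟨a, ⟨?_, ?_⟩, ?_⟩
      · have := mul_nonneg h1 hk.le; omega
      · have hle : (s + 1) * k ≤ m * k := mul_le_mul_of_nonneg_right (by omega) hk.le
        have : (s + 1) * k = s * k + k := by ring
        omega
      · have hfd : PySem.Int.floordiv a k = s := by
          rw [PySem.Int.floordiv_eq_iff_of_pos hk]
          have : (s + 1) * k = s * k + k := by ring
          omega
        exact Or.inl ⟨b, by rw [hfd]; omega, rfl, rfl⟩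
    · refine ⟨a, ⟨?_, ?_⟩, ?_⟩
      · have := mul_nonneg (by omega : (0:Int) ≤ s - 1) hk.le; omega
      · have hle : s * k ≤ m * k := mul_le_mul_of_nonneg_right (by omega) hk.le
        have : s * k = (s - 1) * k + k := by ring
        omega
      · have hfd : PySem.Int.floordiv a k = s - 1 := by
          rw [PySem.Int.floordiv_eq_iff_of_pos hk]
          have : (s - 1 + 1) * k = (s - 1) * k + k := by ring
          omega
        rw [hfd]
        refine Or.inr ?_
        have hcond : s - 1 + 1 < m := by omega
        rw [if_pos hcond]
        have h5' : b = a + k := h5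
        simp [h5']

lemma pvBG_pairwise (m k u : Int) (hk : 0 < k) :
    (pvBG m k u).Pairwise (fun a b => toLex a < toLex b) := by
  have hbr := (PySem.Int.floordiv_eq_iff_of_pos hk (a := u) (q := PySem.Int.floordiv u k)).1 rfl
  have hr : (PySem.Int.floordiv u k + 1) * k = PySem.Int.floordiv u k * k + k := by ring
  unfold pvBG
  rw [List.pairwise_append]
  refine ⟨?_, ?_, ?_⟩
  · refine List.Pairwise.map _ ?_ (PySem.List.pairwise_lt_pyRange_one _ _)
    intro a b hab
    exact Prod.Lex.toLex_lt_toLex.2 (Or.inr ⟨rfl, hab⟩)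
  · split <;> simp
  · intro x hx y hy
    simp only [List.mem_map, PySem.List.mem_pyRange_one] at hx
    obtain ⟨v, hv, rfl⟩ := hx
    split at hy <;> simp at hy
    subst hy
    exact Prod.Lex.toLex_lt_toLex.2 (Or.inr ⟨rfl, by omega⟩)

lemma pvB_pairwise (m k : Int) (hk : 0 < k) :
    ((PySem.List.pyRange 0 (m * k) 1).flatMap (pvBG m k)).Pairwise
      (fun a b => toLex a < toLex b) := by
  rw [List.pairwise_flatMap]
  refine ⟨fun u _ => pvBG_pairwise m k u hk, ?_⟩
  refine (PySem.List.pairwise_lt_pyRange_one 0 (m * k)).imp ?_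
  intro u1 u2 h12 x hx y hy
  exact Prod.Lex.toLex_lt_toLex.2 (Or.inl (by
    rw [fst_of_mem_pvBG m k u1 x hx, fst_of_mem_pvBG m k u2 y hy]; exact h12))

lemma pvB_nodup (m k : Int) (hk : 0 < k) :
    ((PySem.List.pyRange 0 (m * k) 1).flatMap (pvBG m k)).Nodup := by
  refine (pvB_pairwise m k hk).imp ?_
  intro a b h hab
  subst hab
  exact lt_irrefl _ h

lemma pvAStep_id_of_neg (k t : Int) (hk : k < 0)
    (st : PySem.Set (Int × Int) × PySem.Dict (Int × Int) Int) (s : Int) :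
    pvAStep k t st s = st := by
  have h1 : PySem.List.pyRange 0 (k - 1) 1 = [] := PySem.List.pyRange_one_eq_nil (by omega)
  have h2 : PySem.List.pyRange 0 k 1 = [] := PySem.List.pyRange_one_eq_nil (by omega)
  simp only [pvAStep, h1, h2, List.flatMap_nil, List.foldl_nil, ite_self]

lemma pvMain (N k t : Int) (hk0 : k ≠ 0) :
    generate_edges_with_reset_timesteps N k t = generate_edges_with_reset_timesteps_alt N k t := by
  rcases lt_trichotomy k 0 with hk | hk | hk
  · -- k < 0 : A's loop body is a no-op, B returns early
    have hA : (PySem.List.pyRange 0 (PySem.Int.floordiv N k) 1).foldl (pvAStep k t)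
        ((PySem.Set.empty : PySem.Set (Int × Int)), (PySem.Dict.empty : PySem.Dict (Int × Int) Int)) =
        (PySem.Set.empty, PySem.Dict.empty) := by
      rw [PySem.List.foldl_congr_mem _ _ (fun st _ => st) _
        (fun acc x _ => pvAStep_id_of_neg k t hk acc x)]
      exact PySem.List.foldl_ignore _ _
    simp only [generate_edges_with_reset_timesteps, generate_edges_with_reset_timesteps_alt, hA,
      if_pos (le_of_lt hk)]
    rfl
  · exact absurd hk hk0
  · -- 0 < k
    set m := PySem.Int.floordiv N k with hm
    rcases le_or_gt m 0 with hm0 | hm0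
    · have hA : PySem.List.pyRange 0 m 1 = [] := PySem.List.pyRange_one_eq_nil hm0
      have hmk : m * k ≤ 0 := by
        have := mul_le_mul_of_nonneg_right hm0 hk.le
        simpa using this
      have hB : PySem.List.pyRange 0 (m * k) 1 = [] := PySem.List.pyRange_one_eq_nil hmk
      simp only [generate_edges_with_reset_timesteps, generate_edges_with_reset_timesteps_alt,
        ← hm, hA, hB, if_neg (by omega : ¬ k ≤ 0), List.foldl_nil]
      rfl
    · -- at least one subgraph
      have hncast : ((m.toNat : Nat) : Int) = m := Int.toNat_of_nonneg hm0.le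
      obtain ⟨hmem, hnd, hget⟩ := pvA_loop k t hk m.toNat
      rw [hncast] at hmem hnd hget
      set st := (PySem.List.pyRange 0 m 1).foldl (pvAStep k t)
        ((PySem.Set.empty : PySem.Set (Int × Int)), (PySem.Dict.empty : PySem.Dict (Int × Int) Int)) with hstdef
      set EB := (PySem.List.pyRange 0 (m * k) 1).flatMap (pvBG m k) with hEB
      have hperm : EB.Perm st.1 := by
        rw [List.perm_ext_iff_of_nodup (pvB_nodup m k hk) hnd]
        intro e
        rw [mem_pvB m k hk e, hmem e]
      have hsorted : PySem.List.sorted st.1 (fun e => toLex e) = EB :=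
        PySem.List.sorted_eq_of_perm_of_pairwise_lt st.1 EB (fun e => toLex e)
          hperm (pvB_pairwise m k hk)
      have hmap : EB.map (fun e => st.2.getD e 0) =
          EB.map (fun e => PySem.Int.mod (PySem.Int.floordiv e.2 k) t + 1) := by
        apply List.map_congr_left
        intro e he
        have he' : e ∈ st.1 := (hmem e).2 ((mem_pvB m k hk e).1 (hEB ▸ he))
        rw [PySem.Dict.getD_eq_get?_getD, hget e he']
        rfl
      simp only [generate_edges_with_reset_timesteps, generate_edges_with_reset_timesteps_alt,
        ← hm, if_neg (by omega : ¬ k ≤ 0), ← hstdef, hsorted, pvB_edges m k, ← hEB, hmap]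

-- ===== VERDICT =====
theorem generate_edges_with_reset_timesteps_spec : Claim_equal_generate_edges_with_reset_timesteps := by
  intro N k t _ hpre
  unfold Spec_generate_edges_with_reset_timesteps
  exact pvMain N k t hpre.1
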